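-- pv_equiv track=rewrite | github.com/BaeSuyoung/CHAR-GBERT | models/utils.py | section_dict
-- ===== SOURCE A (Python) =====
-- def section_dict(sentences, character_tokens):
--     sections_dictionary = {}
--     iterative = 0
--     for sentence in sentences:
--         iterative += 1
--         for char in character_tokens:
--             if char in sentence:
--                 if str(iterative) in sections_dictionary.keys():
--                     sections_dictionary[str(iterative)].append(char)
--                 else:
--                     sections_dictionary[str(iterative)] = [char]
--
--     return sections_dictionary
-- ===== SOURCE B (Python) =====
-- def section_dict(sentences, character_tokens):
--     # char-major pass: containment matrix, then assemble each sentence's token list at once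
--     hits = [[c in s for s in sentences] for c in character_tokens]
--     result = {}
--     for i in range(len(sentences)):
--         toks = [c for c, row in zip(character_tokens, hits) if row[i]]
--         if toks:
--             result[str(i + 1)] = toks
--     return result
-- ===== Notes on version B (the rewrite author's own statement) =====
-- stated objective: alternative
-- what changed: Replaces A's sentence-major nested loops that grow dict entries one token at a time (membership test + append per hit) with a char-major precomputed containment matrix that is transposed per sentence via zip-filter, inserting each complete token list with one dict assignment.
import Mathlib
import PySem

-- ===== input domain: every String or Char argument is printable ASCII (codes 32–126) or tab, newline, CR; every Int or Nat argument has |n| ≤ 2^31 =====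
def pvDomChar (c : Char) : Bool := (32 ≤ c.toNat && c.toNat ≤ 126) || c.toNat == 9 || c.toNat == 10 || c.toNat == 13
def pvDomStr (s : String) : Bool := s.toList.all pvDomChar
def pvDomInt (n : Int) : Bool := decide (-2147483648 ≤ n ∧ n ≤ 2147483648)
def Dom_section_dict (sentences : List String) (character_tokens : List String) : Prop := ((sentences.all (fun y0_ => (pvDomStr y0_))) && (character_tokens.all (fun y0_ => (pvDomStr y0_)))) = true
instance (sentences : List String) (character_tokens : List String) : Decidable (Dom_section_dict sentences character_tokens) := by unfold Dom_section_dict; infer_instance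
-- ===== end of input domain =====

-- B replaces A's sentence-major dict-growing loops by a char-major containment matrix
-- transposed per sentence (objective: alternative, same asymptotic cost).

-- ===== PORT A =====
-- inner 'for char in character_tokens' loop of A (dict grows one token at a time)
def sdInner (character_tokens : List String) (sentence : String) (iterative : Int)
    (d : PySem.Dict String (List String)) : PySem.Dict String (List String) :=
  character_tokens.foldl (fun d char =>
    if PySem.Str.isIn char sentence then
      if d.contains (PySem.Int.toStr iterative) then
        d.modify (PySem.Int.toStr iterative) [] (fun l => l ++ [char])
      else
        d.insert (PySem.Int.toStr iterative) [char]
    else d) d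

def section_dict (sentences : List String) (character_tokens : List String) : List (String × List String) :=
  ((sentences.foldl
      (fun (st : PySem.Dict String (List String) × Int) sentence =>
        (sdInner character_tokens sentence (st.2 + 1) st.1, st.2 + 1))
      (PySem.Dict.empty, 0)).1).items

-- ===== PORT B =====
-- body of B's 'for i in range(len(sentences))' loop: one zip-filter over the matrix rows, one insert
def sdAltStep (character_tokens : List String) (hits : List (List Bool))
    (r : PySem.Dict String (List String)) (i : Int) : PySem.Dict String (List String) :=
  let toks := ((character_tokens.zip hits).filter
      (fun p => PySem.List.pyGetD p.2 i false)).map (fun p => p.1)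
  if toks = [] then r else r.insert (PySem.Int.toStr (i + 1)) toks

def section_dict_alt (sentences : List String) (character_tokens : List String) : List (String × List String) :=
  let hits := character_tokens.map (fun c => sentences.map (fun s => PySem.Str.isIn c s))
  ((PySem.List.pyRange 0 (PySem.List.len sentences) 1).foldl
      (sdAltStep character_tokens hits) PySem.Dict.empty).items

-- ===== PRECONDITION & SPEC =====
def Spec_section_dict (sentences : List String) (character_tokens : List String) (out : List (String × List String)) : Prop := out = section_dict_alt sentences character_tokens
instance (sentences : List String) (character_tokens : List String) (out : List (String × List String)) : Decidable (Spec_section_dict sentences character_tokens out) := by unfold Spec_section_dict; infer_instance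

-- ===== CLAIM (what is proved, stated in full; the proofs are below) =====
def Claim_equal_section_dict : Prop := ∀ (sentences : List String) (character_tokens : List String), Dom_section_dict sentences character_tokens → Spec_section_dict sentences character_tokens (section_dict sentences character_tokens)

-- ===== LEMMAS AND PROOFS =====

-- the common canonical value: one entry per matching sentence, tokens in character_tokens order
def canonFrom (toks : List String) : List String → Nat → List (String × List String)
  | [], _ => []
  | s :: rest, k =>
    (if toks.filter (fun c => PySem.Str.isIn c s) = [] then []
     else [(PySem.Int.toStr ((k : Int) + 1), toks.filter (fun c => PySem.Str.isIn c s))])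
    ++ canonFrom toks rest (k + 1)

-- str(n) is injective on positive ints (via Nat.digits)
lemma toDigitsCore10_eq (f : Nat) : ∀ (n : Nat) (acc : List Char), 0 < n → n < f →
    Nat.toDigitsCore 10 f n acc = ((Nat.digits 10 n).map Nat.digitChar).reverse ++ acc := by
  induction f with
  | zero => intro n acc hn hf; omega
  | succ f ih =>
    intro n acc hn hf
    rw [Nat.toDigitsCore]
    rw [Nat.digits_def' (by norm_num : (1:Nat) < 10) hn]
    by_cases h10 : n / 10 = 0
    · simp [h10]
    · have hpos : 0 < n / 10 := Nat.pos_of_ne_zero h10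
      have hlt : n / 10 < f := by
        have := Nat.div_lt_self hn (by norm_num : (1:Nat) < 10)
        omega
      simp only [h10, if_false]
      rw [ih (n / 10) _ hpos hlt]
      simp

lemma toDigits10_eq (n : Nat) (hn : 0 < n) :
    Nat.toDigits 10 n = ((Nat.digits 10 n).map Nat.digitChar).reverse := by
  have := toDigitsCore10_eq (n + 1) n [] hn (Nat.lt_succ_self n)
  simpa [Nat.toDigits] using this

lemma digitChar_toNat (d : Nat) (h : d < 10) : (Nat.digitChar d).toNat - 48 = d := by
  interval_cases d <;> rfl

lemma map_digitChar_inj (l1 l2 : List Nat) (h1 : ∀ d ∈ l1, d < 10) (h2 : ∀ d ∈ l2, d < 10)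
    (h : l1.map Nat.digitChar = l2.map Nat.digitChar) : l1 = l2 := by
  have key : ∀ (l : List Nat), (∀ d ∈ l, d < 10) →
      (l.map Nat.digitChar).map (fun c => c.toNat - 48) = l := by
    intro l hl
    rw [List.map_map]
    have : ∀ d ∈ l, ((fun c : Char => c.toNat - 48) ∘ Nat.digitChar) d = id d := by
      intro d hd; simpa using digitChar_toNat d (hl d hd)
    rw [List.map_congr_left this, List.map_id]
  have := congrArg (List.map (fun c : Char => c.toNat - 48)) h
  rwa [key l1 h1, key l2 h2] at this

lemma toStr_cast_inj (a b : Nat) (ha : 0 < a) (hb : 0 < b)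
    (h : PySem.Int.toStr (a : Int) = PySem.Int.toStr (b : Int)) : a = b := by
  have hl := congrArg String.toList h
  rw [PySem.Int.toList_toStr, PySem.Int.toList_toStr] at hl
  simp only [PySem.Int.toChars] at hl
  rw [if_neg (by omega), if_neg (by omega)] at hl
  simp only [Int.toNat_natCast] at hl
  rw [toDigits10_eq a ha, toDigits10_eq b hb] at hl
  have hmap := List.reverse_injective hl
  have hd := map_digitChar_inj _ _
    (fun d hd => Nat.digits_lt_base (by norm_num) hd)
    (fun d hd => Nat.digits_lt_base (by norm_num) hd) hmap
  exact Nat.digits.injective 10 hd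

-- dict lookups on an explicit items list whose last entry holds the key
lemma get?_last (key : String) (acc : List String) :
    ∀ (l : List (String × List String)), (∀ p ∈ l, p.1 ≠ key) →
    (PySem.Dict.mk (l ++ [(key, acc)])).get? key = some acc := by
  intro l hl
  induction l with
  | nil => simp [PySem.Dict.get?_mk_cons]
  | cons p t ih =>
    rw [List.cons_append, PySem.Dict.get?_mk_cons]
    rw [if_neg (by simp [hl p (by simp)])]
    exact ih (fun q hq => hl q (by simp [hq]))

lemma contains_last (key : String) (acc : List String) (l : List (String × List String)) :
    (PySem.Dict.mk (l ++ [(key, acc)])).contains key = true := by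
  simp [PySem.Dict.contains]

-- A's inner loop once the key is already the last entry: it appends matching tokens there
lemma innerAux (sentence key : String) :
    ∀ (toks : List String) (l : List (String × List String)) (acc : List String),
    (∀ p ∈ l, p.1 ≠ key) →
    toks.foldl (fun d char =>
        if PySem.Str.isIn char sentence then
          if d.contains key then d.modify key [] (fun l => l ++ [char])
          else d.insert key [char]
        else d) (PySem.Dict.mk (l ++ [(key, acc)]))
      = PySem.Dict.mk (l ++ [(key, acc ++ toks.filter (fun c => PySem.Str.isIn c sentence))]) := by
  intro toks
  induction toks with
  | nil => intro l acc hl; simp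
  | cons c rest ih =>
    intro l acc hl
    rw [List.foldl_cons]
    by_cases hc : PySem.Str.isIn c sentence
    · rw [if_pos hc, if_pos (contains_last key acc l)]
      have hmod : (PySem.Dict.mk (l ++ [(key, acc)])).modify key [] (fun l => l ++ [c])
          = PySem.Dict.mk (l ++ [(key, acc ++ [c])]) := by
        apply PySem.Dict.ext
        rw [PySem.Dict.modify, PySem.Dict.getD_eq_get?_getD, get?_last key acc l hl]
        rw [PySem.Dict.items_insert_of_contains _ _ (contains_last key acc l)]
        simp only [Option.getD_some]
        rw [List.map_append]
        congr 1
        · rw [List.map_congr_left (g := id), List.map_id]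
          intro p hp
          simp [beq_eq_false_iff_ne.mpr (hl p hp)]
        · simp
      rw [hmod, ih l (acc ++ [c]) hl]
      rw [List.filter_cons, if_pos hc]
      simp
    · rw [if_neg hc, ih l acc hl]
      rw [List.filter_cons, if_neg hc]

-- A's inner loop from a dict not containing the key: appends one fresh entry iff some token matches
lemma innerStart (sentence key : String) :
    ∀ (toks : List String) (d : PySem.Dict String (List String)), d.contains key = false →
    toks.foldl (fun d char =>
        if PySem.Str.isIn char sentence then
          if d.contains key then d.modify key [] (fun l => l ++ [char])
          else d.insert key [char]
        else d) d
      = PySem.Dict.mk (d.items ++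
          (if toks.filter (fun c => PySem.Str.isIn c sentence) = [] then []
           else [(key, toks.filter (fun c => PySem.Str.isIn c sentence))])) := by
  intro toks
  induction toks with
  | nil => intro d hd; apply PySem.Dict.ext; simp
  | cons c rest ih =>
    intro d hd
    rw [List.foldl_cons]
    have hnk : ∀ p ∈ d.items, p.1 ≠ key := by
      intro p hp he
      have hcon : d.contains key = true := by
        simp only [PySem.Dict.contains]
        exact List.any_eq_true.mpr ⟨p, hp, by simp [he]⟩
      rw [hcon] at hd
      cases hd
    by_cases hc : PySem.Str.isIn c sentence
    · rw [if_pos hc, if_neg (by simp [hd])]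
      have hins : d.insert key [c] = PySem.Dict.mk (d.items ++ [(key, [c])]) := by
        apply PySem.Dict.ext
        rw [PySem.Dict.items_insert_of_not_contains d [c] hd]
      rw [hins, innerAux sentence key rest d.items [c] hnk]
      rw [List.filter_cons, if_pos hc]
      simp
    · rw [if_neg hc, ih d hd]
      rw [List.filter_cons, if_neg hc]

-- freshness of all larger keys is preserved when one entry with the current key is appended
lemma fresh_append (d : PySem.Dict String (List String)) (k : Nat)
    (hfresh : ∀ j : Nat, k < j → d.contains (PySem.Int.toStr (j : Int)) = false)
    (E : List (String × List String))
    (hE : ∀ p ∈ E, p.1 = PySem.Int.toStr ((k : Int) + 1)) :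
    ∀ j : Nat, k + 1 < j →
      (PySem.Dict.mk (d.items ++ E)).contains (PySem.Int.toStr (j : Int)) = false := by
  intro j hj
  have h1 := hfresh j (by omega)
  simp only [PySem.Dict.contains, List.any_append] at h1 ⊢
  rw [h1, Bool.false_or]
  rw [List.any_eq_false]
  intro p hp
  rw [hE p hp]
  have hne : PySem.Int.toStr ((k : Int) + 1) ≠ PySem.Int.toStr (j : Int) := by
    intro he
    have : ((k : Int) + 1) = ((k + 1 : Nat) : Int) := by push_cast; ring
    rw [this] at he
    have := toStr_cast_inj (k + 1) j (by omega) (by omega) he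
    omega
  simp [hne]

-- A's outer loop produces the canonical list
lemma outerA (character_tokens : List String) :
    ∀ (ss : List String) (k : Nat) (d : PySem.Dict String (List String)),
    (∀ j : Nat, k < j → d.contains (PySem.Int.toStr (j : Int)) = false) →
    ((ss.foldl
        (fun (st : PySem.Dict String (List String) × Int) sentence =>
          (sdInner character_tokens sentence (st.2 + 1) st.1, st.2 + 1))
        (d, (k : Int))).1).items
      = d.items ++ canonFrom character_tokens ss k := by
  intro ss
  induction ss with
  | nil =>
    intro k d hfresh
    rw [List.foldl_nil]
    rw [show canonFrom character_tokens [] k = [] from rfl, List.append_nil]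
  | cons s rest ih =>
    intro k d hfresh
    have hkey : d.contains (PySem.Int.toStr ((k : Int) + 1)) = false := by
      have : ((k : Int) + 1) = ((k + 1 : Nat) : Int) := by push_cast; ring
      rw [this]; exact hfresh (k + 1) (by omega)
    have hstep : sdInner character_tokens s ((k : Int) + 1) d
        = PySem.Dict.mk (d.items ++
            (if character_tokens.filter (fun c => PySem.Str.isIn c s) = [] then []
             else [(PySem.Int.toStr ((k : Int) + 1),
                    character_tokens.filter (fun c => PySem.Str.isIn c s))])) := by
      exact innerStart s (PySem.Int.toStr ((k : Int) + 1)) character_tokens d hkey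
    have hcast : ((k : Int) + 1) = ((k + 1 : Nat) : Int) := by push_cast; ring
    show (List.foldl
        (fun (st : PySem.Dict String (List String) × Int) sentence =>
          (sdInner character_tokens sentence (st.2 + 1) st.1, st.2 + 1))
        (sdInner character_tokens s ((k : Int) + 1) d, (k : Int) + 1) rest).1.items
      = d.items ++ canonFrom character_tokens (s :: rest) k
    rw [hstep]
    have hfresh' := fresh_append d k hfresh
      (if character_tokens.filter (fun c => PySem.Str.isIn c s) = [] then []
       else [(PySem.Int.toStr ((k : Int) + 1),
              character_tokens.filter (fun c => PySem.Str.isIn c s))])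
      (by
        intro p hp
        split at hp
        · cases hp
        · simp at hp; subst hp; rfl)
    have ihinst := ih (k + 1)
      (PySem.Dict.mk (d.items ++
        (if character_tokens.filter (fun c => PySem.Str.isIn c s) = [] then []
         else [(PySem.Int.toStr ((k : Int) + 1),
                character_tokens.filter (fun c => PySem.Str.isIn c s))]))) hfresh'
    rw [← hcast] at ihinst
    rw [ihinst]
    simp [canonFrom, List.append_assoc]

-- B's per-sentence zip-filter over the matrix equals the direct filter
lemma zip_map_filter (g : String → List Bool) (h : List Bool → Bool) :
    ∀ (l : List String),
    ((l.zip (l.map g)).filter (fun p => h p.2)).map (fun p => p.1)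
      = l.filter (fun c => h (g c)) := by
  intro l
  induction l with
  | nil => rfl
  | cons a t ih =>
    simp only [List.map_cons, List.zip_cons_cons, List.filter_cons]
    by_cases hga : h (g a)
    · simp [hga, ih]
    · simp [hga, ih]

-- B's outer loop produces the canonical list
lemma outerB (sentences character_tokens : List String) :
    ∀ (m k : Nat) (d : PySem.Dict String (List String)), k + m = sentences.length →
    (∀ j : Nat, k < j → d.contains (PySem.Int.toStr (j : Int)) = false) →
    ((List.range' k m).foldl
        (fun r i => sdAltStep character_tokens
          (character_tokens.map (fun c => sentences.map (fun s => PySem.Str.isIn c s))) r ((i : Nat) : Int)) d).items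
      = d.items ++ canonFrom character_tokens (sentences.drop k) k := by
  intro m
  induction m with
  | zero =>
    intro k d hk hfresh
    rw [List.drop_of_length_le (by omega)]
    simp [canonFrom]
  | succ m ih =>
    intro k d hk hfresh
    have hklt : k < sentences.length := by omega
    rw [List.range'_succ, List.foldl_cons]
    have htoks : ((character_tokens.zip
          (character_tokens.map (fun c => sentences.map (fun s => PySem.Str.isIn c s)))).filter
          (fun p => PySem.List.pyGetD p.2 ((k : Nat) : Int) false)).map (fun p => p.1)
        = character_tokens.filter (fun c => PySem.Str.isIn c sentences[k]) := by
      rw [zip_map_filter (fun c => sentences.map (fun s => PySem.Str.isIn c s))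
            (fun row => PySem.List.pyGetD row ((k : Nat) : Int) false) character_tokens]
      apply List.filter_congr
      intro c _
      rw [PySem.List.pyGetD_natCast]
      simp [List.getD_eq_getElem?_getD, List.getElem?_map, List.getElem?_eq_getElem hklt]
    have hstep : sdAltStep character_tokens
        (character_tokens.map (fun c => sentences.map (fun s => PySem.Str.isIn c s))) d ((k : Nat) : Int)
        = PySem.Dict.mk (d.items ++
            (if character_tokens.filter (fun c => PySem.Str.isIn c sentences[k]) = [] then []
             else [(PySem.Int.toStr ((k : Int) + 1),
                    character_tokens.filter (fun c => PySem.Str.isIn c sentences[k]))])) := by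
      rw [sdAltStep, htoks]
      by_cases hf : character_tokens.filter (fun c => PySem.Str.isIn c sentences[k]) = []
      · rw [if_pos hf, if_pos hf]
        apply PySem.Dict.ext; simp
      · rw [if_neg hf, if_neg hf]
        apply PySem.Dict.ext
        rw [PySem.Dict.items_insert_of_not_contains _ _ (by
          have : ((k : Int) + 1) = ((k + 1 : Nat) : Int) := by push_cast; ring
          rw [this]; exact hfresh (k + 1) (by omega))]
    rw [hstep]
    have hfresh' := fresh_append d k hfresh
      (if character_tokens.filter (fun c => PySem.Str.isIn c sentences[k]) = [] then []
       else [(PySem.Int.toStr ((k : Int) + 1),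
              character_tokens.filter (fun c => PySem.Str.isIn c sentences[k]))])
      (by
        intro p hp
        split at hp
        · cases hp
        · simp at hp; subst hp; rfl)
    rw [ih (k + 1) _ (by omega) hfresh']
    rw [List.drop_eq_getElem_cons hklt]
    simp [canonFrom, List.append_assoc]

-- ===== VERDICT (by name: the statement is the Claim_ definition above) =====
theorem section_dict_spec : Claim_equal_section_dict := by
  intro sentences character_tokens _
  unfold Spec_section_dict
  unfold section_dict
  have hBdef : section_dict_alt sentences character_tokens
      = ((PySem.List.pyRange 0 (PySem.List.len sentences) 1).foldl
          (sdAltStep character_tokens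
            (character_tokens.map (fun c => sentences.map (fun s => PySem.Str.isIn c s))))
          PySem.Dict.empty).items := rfl
  rw [hBdef]
  have hfresh : ∀ j : Nat, 0 < j →
      (PySem.Dict.empty : PySem.Dict String (List String)).contains (PySem.Int.toStr (j : Int)) = false := by
    intro j _; simp [PySem.Dict.contains, PySem.Dict.empty]
  have hA := outerA character_tokens sentences 0 PySem.Dict.empty hfresh
  have hB := outerB sentences character_tokens sentences.length 0 PySem.Dict.empty (by omega) hfresh
  rw [show ((0 : Nat) : Int) = (0 : Int) by simp] at hA
  rw [hA]
  simp only [PySem.List.len_eq, PySem.List.pyRange_zero_natCast, List.foldl_map,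
    List.range_eq_range']
  rw [hB]
  simp [PySem.Dict.empty]
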